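-- pv_equiv track=rewrite | github.com/AadiKuchlous/Sikshana-text_to_vid | main.py | underline_html
-- ===== SOURCE A (Python) =====
-- def underline_html(text):
-- 	html = ""
-- 	first = True
-- 	for i in text:
-- 		if i != '_':
-- 			html += i
-- 		else:
-- 			if first:
-- 				html += '<u>'
-- 				first = False
-- 			else:
-- 				html += '</u>'
-- 				first = True
-- 	return html
-- ===== SOURCE B (Python) =====
-- def underline_html(text):
--     parts = text.split('_')
--     pieces = [parts[0]]
--     underline = True
--     for part in parts[1:]:
--         pieces.append('<u>' if underline else '</u>')
--         pieces.append(part)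
--         underline = not underline
--     return ''.join(pieces)
-- ===== Notes on version B (the rewrite author's own statement) =====
-- stated objective: faster
-- what changed: Replaces the per-character scan with a boolean flag by splitting the text on underscore once and joining the segments with alternating opening/closing underline tags at each boundary.
import Mathlib
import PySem

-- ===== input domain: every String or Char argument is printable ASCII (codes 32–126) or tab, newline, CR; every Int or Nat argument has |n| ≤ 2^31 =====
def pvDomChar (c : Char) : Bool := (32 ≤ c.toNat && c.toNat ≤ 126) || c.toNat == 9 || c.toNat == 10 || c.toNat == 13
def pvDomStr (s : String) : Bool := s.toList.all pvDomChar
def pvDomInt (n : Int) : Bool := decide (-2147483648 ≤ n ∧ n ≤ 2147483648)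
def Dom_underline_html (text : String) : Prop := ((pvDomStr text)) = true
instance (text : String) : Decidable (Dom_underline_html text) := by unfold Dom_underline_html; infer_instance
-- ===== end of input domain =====

-- B replaces A's per-character scan with split-on-'_' then join with alternating tags (objective: alternative).

-- ===== PORT A =====
-- one loop step of A: append the char, or the alternating tag, to the html accumulator
def underlineStep (st : List Char × Bool) (i : Char) : List Char × Bool :=
  if i ≠ '_' then (st.1 ++ [i], st.2)
  else if st.2 then (st.1 ++ ['<', 'u', '>'], false)
  else (st.1 ++ ['<', '/', 'u', '>'], true)

def underline_html (text : String) : String :=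
  String.mk (text.toList.foldl underlineStep ([], true)).1

-- ===== PORT B =====
-- hand port of Python's text.split('_') (exact): first segment, remaining segments
def splitU : List Char → List Char × List (List Char)
  | [] => ([], [])
  | c :: cs =>
    if c = '_' then ([], (splitU cs).1 :: (splitU cs).2)
    else (c :: (splitU cs).1, (splitU cs).2)

-- the loop over parts[1:]: alternating tag then segment, toggle flips each boundary
def tagJoin : Bool → List (List Char) → List Char
  | _, [] => []
  | b, p :: ps => (if b then ['<', 'u', '>'] else ['<', '/', 'u', '>']) ++ p ++ tagJoin (!b) ps

def underline_html_alt (text : String) : String :=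
  String.mk ((splitU text.toList).1 ++ tagJoin true (splitU text.toList).2)

-- ===== PRECONDITION & SPEC =====
def Spec_underline_html (text : String) (out : String) : Prop := out = underline_html_alt text
instance (text : String) (out : String) : Decidable (Spec_underline_html text out) := by unfold Spec_underline_html; infer_instance

-- ===== CLAIM (what is proved, stated in full; the proofs are below) =====
def Claim_equal_underline_html : Prop := ∀ (text : String), Dom_underline_html text → Spec_underline_html text (underline_html text)

-- ===== LEMMAS AND PROOFS =====

-- the real invariant: A's loop from (acc, b) produces acc ++ first-segment ++ alternating join
theorem loop_eq_split (cs : List Char) : ∀ (acc : List Char) (b : Bool),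
    (cs.foldl underlineStep (acc, b)).1 =
      acc ++ (splitU cs).1 ++ tagJoin b (splitU cs).2 := by
  induction cs with
  | nil => intro acc b; simp [splitU, tagJoin]
  | cons c cs ih =>
    intro acc b
    by_cases hc : c = '_'
    · subst hc
      cases b <;>
        simp [List.foldl_cons, underlineStep, splitU, tagJoin, ih, List.append_assoc]
    · simp [List.foldl_cons, underlineStep, hc, splitU, ih, List.append_assoc]

-- ===== VERDICT (by name: the statement is the Claim_ definition above) =====
theorem underline_html_spec : Claim_equal_underline_html := by
  intro text _
  unfold Spec_underline_html underline_html underline_html_alt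
  rw [loop_eq_split]
  simp
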